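-- pv_equiv track=rewrite | github.com/MohamadAshrafSalama/Newcomers-OSS-Vs.-OSS4SG-FSE-2026 | RQ2_newcomer_treatment_patterns_test2/step4.1_milestones_redo/common_paths/compute_common_paths.py | compute_top_common_paths
-- ===== SOURCE A (Python) =====
-- from collections import Counter
-- from typing import Dict, Iterable, List, Tuple, Optional
--
-- def compute_top_common_paths(
--     rows: List[Tuple[str, str]],
--     project_type_filter: Optional[str],
--     top_k: int,
--     exclude_empty: bool,
--     prefix_tokens: Optional[List[str]] = None,
-- ) -> Tuple[Counter, int, int, int, int]:
--     """Compute top-k common full sequences for an optional project_type filter.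
--
--     - project_type_filter=None for Overall
--     - Otherwise, filter to rows where project_type == filter
--     Returns (counter, total_after, excluded_count, total_before).
--     """
--     if project_type_filter is None:
--         filtered_sequences = [sequence for (_ptype, sequence) in rows]
--     else:
--         filtered_sequences = [sequence for (ptype, sequence) in rows if ptype == project_type_filter]
--
--     total_before = len(filtered_sequences)
--     if exclude_empty:
--         filtered_sequences = [seq for seq in filtered_sequences if seq != "START,END"]
--     after_empty = len(filtered_sequences)
--     excluded_empty = total_before - after_empty
--
--     excluded_prefix = 0
--     if prefix_tokens:
--         prefix_len = len(prefix_tokens)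
--         kept = []
--         for seq in filtered_sequences:
--             tokens = seq.split(",") if seq else []
--             if len(tokens) >= prefix_len and tokens[:prefix_len] == prefix_tokens:
--                 kept.append(seq)
--         excluded_prefix = after_empty - len(kept)
--         filtered_sequences = kept
--
--     total_after = len(filtered_sequences)
--
--     return Counter(filtered_sequences), total_after, excluded_empty, excluded_prefix, total_before
-- ===== SOURCE B (Python) =====
-- from collections import Counter
-- from typing import List, Tuple, Optional
--
-- def compute_top_common_paths(
--     rows: List[Tuple[str, str]],
--     project_type_filter: Optional[str],
--     top_k: int,
--     exclude_empty: bool,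
--     prefix_tokens: Optional[List[str]] = None,
-- ) -> Tuple[Counter, int, int, int, int]:
--     """Single pass over rows maintaining the counter and the four tallies."""
--     counter = Counter()
--     total_before = total_after = excluded_empty = excluded_prefix = 0
--     for ptype, seq in rows:
--         if project_type_filter is not None and ptype != project_type_filter:
--             continue
--         total_before += 1
--         if exclude_empty and seq == "START,END":
--             excluded_empty += 1
--             continue
--         if prefix_tokens:
--             tokens = seq.split(",") if seq else []
--             if tokens[:len(prefix_tokens)] != prefix_tokens:
--                 excluded_prefix += 1
--                 continue
--         counter[seq] += 1
--         total_after += 1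
--     return counter, total_after, excluded_empty, excluded_prefix, total_before
-- ===== Notes on version B (the rewrite author's own statement) =====
-- stated objective: simpler
-- what changed: Replaced A's three sequential list-comprehension passes plus a final Counter(...) build by a single loop over the rows that maintains the Counter and the four tallies incrementally.
import Mathlib
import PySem

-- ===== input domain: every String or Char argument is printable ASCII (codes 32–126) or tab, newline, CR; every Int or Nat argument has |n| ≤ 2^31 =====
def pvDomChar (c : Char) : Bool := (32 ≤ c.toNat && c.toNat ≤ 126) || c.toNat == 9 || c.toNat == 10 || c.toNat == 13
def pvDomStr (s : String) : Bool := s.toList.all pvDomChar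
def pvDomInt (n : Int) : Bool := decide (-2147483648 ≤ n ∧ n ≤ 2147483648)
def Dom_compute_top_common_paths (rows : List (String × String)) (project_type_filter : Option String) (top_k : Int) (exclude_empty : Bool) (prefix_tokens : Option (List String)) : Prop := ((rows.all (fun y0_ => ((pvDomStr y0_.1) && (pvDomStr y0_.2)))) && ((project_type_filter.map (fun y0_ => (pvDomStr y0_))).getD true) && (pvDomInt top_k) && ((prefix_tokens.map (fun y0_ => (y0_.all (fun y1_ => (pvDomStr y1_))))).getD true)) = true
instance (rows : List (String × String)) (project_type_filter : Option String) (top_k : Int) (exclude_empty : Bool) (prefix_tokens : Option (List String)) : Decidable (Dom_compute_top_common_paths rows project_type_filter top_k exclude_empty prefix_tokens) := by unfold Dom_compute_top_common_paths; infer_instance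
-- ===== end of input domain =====

-- ===== PORT A =====
-- B replaces A's three sequential filtering passes by one loop over the rows
-- maintaining the counter and the four tallies (objective: simpler).
def compute_top_common_paths (rows : List (String × String)) (project_type_filter : Option String) (top_k : Int) (exclude_empty : Bool) (prefix_tokens : Option (List String)) : (List (String × Int)) × Int × Int × Int × Int :=
  let filtered_sequences :=
    match project_type_filter with
    | none => rows.map (fun r => r.2)
    | some f => (rows.filter (fun r => r.1 == f)).map (fun r => r.2)
  let total_before : Int := filtered_sequences.length
  let filtered_sequences2 :=
    if exclude_empty then filtered_sequences.filter (fun s => !(s == "START,END"))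
    else filtered_sequences
  let after_empty : Int := filtered_sequences2.length
  let excluded_empty : Int := total_before - after_empty
  let step3 : List String × Int :=
    match prefix_tokens with
    | none => (filtered_sequences2, 0)
    | some pt =>
      if pt.isEmpty then (filtered_sequences2, 0)   -- Python: 'if prefix_tokens:' is false for []
      else
        let prefix_len := pt.length
        let kept := filtered_sequences2.foldl (fun acc s =>
          -- tokens = seq.split(",") if seq else []   (split? is exact; sep "," ≠ "" so getD never fires)
          let tokens := if s == "" then [] else (PySem.Str.split? s ",").getD []
          if decide (prefix_len ≤ tokens.length) && (tokens.take prefix_len == pt)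
          then acc ++ [s] else acc) []
        (kept, after_empty - (kept.length : Int))
  let total_after : Int := step3.1.length
  ((PySem.Dict.counter step3.1).items, total_after, excluded_empty, step3.2, total_before)

-- ===== PORT B =====
-- Source B's row test 'project_type_filter is None or ptype == project_type_filter'
def pvMatch (ptf : Option String) (r : String × String) : Bool :=
  match ptf with | none => true | some f => r.1 == f

-- Source B's loop body: one row processed against the three gates
def pvStep (ptf : Option String) (ex : Bool) (pt? : Option (List String))
    (st : PySem.Dict String Int × Int × Int × Int × Int) (r : String × String) :
    PySem.Dict String Int × Int × Int × Int × Int :=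
  let (d, ta, ee, ep, tb) := st
  if pvMatch ptf r then
    if ex && (r.2 == "START,END") then (d, ta, ee + 1, ep, tb + 1)
    else
      match pt? with
      | none => (d.modify r.2 0 (· + 1), ta + 1, ee, ep, tb + 1)
      | some pt =>
        if pt.isEmpty then (d.modify r.2 0 (· + 1), ta + 1, ee, ep, tb + 1)
        else
          let tokens := if r.2 == "" then [] else (PySem.Str.split? r.2 ",").getD []
          if tokens.take pt.length == pt then (d.modify r.2 0 (· + 1), ta + 1, ee, ep, tb + 1)
          else (d, ta, ee, ep + 1, tb + 1)
  else st

def compute_top_common_paths_alt (rows : List (String × String)) (project_type_filter : Option String) (top_k : Int) (exclude_empty : Bool) (prefix_tokens : Option (List String)) : (List (String × Int)) × Int × Int × Int × Int :=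
  let st := rows.foldl (pvStep project_type_filter exclude_empty prefix_tokens)
    ((PySem.Dict.empty : PySem.Dict String Int), (0 : Int), (0 : Int), (0 : Int), (0 : Int))
  (st.1.items, st.2.1, st.2.2.1, st.2.2.2.1, st.2.2.2.2)

-- ===== PRECONDITION & SPEC =====
def Spec_compute_top_common_paths (rows : List (String × String)) (project_type_filter : Option String) (top_k : Int) (exclude_empty : Bool) (prefix_tokens : Option (List String)) (out : (List (String × Int)) × Int × Int × Int × Int) : Prop := out = compute_top_common_paths_alt rows project_type_filter top_k exclude_empty prefix_tokens
instance (rows : List (String × String)) (project_type_filter : Option String) (top_k : Int) (exclude_empty : Bool) (prefix_tokens : Option (List String)) (out : (List (String × Int)) × Int × Int × Int × Int) : Decidable (Spec_compute_top_common_paths rows project_type_filter top_k exclude_empty prefix_tokens out) := by unfold Spec_compute_top_common_paths; infer_instance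

-- ===== CLAIM (what is proved, stated in full; the proofs are below) =====
def Claim_equal_compute_top_common_paths : Prop := ∀ (rows : List (String × String)) (project_type_filter : Option String) (top_k : Int) (exclude_empty : Bool) (prefix_tokens : Option (List String)), Dom_compute_top_common_paths rows project_type_filter top_k exclude_empty prefix_tokens → Spec_compute_top_common_paths rows project_type_filter top_k exclude_empty prefix_tokens (compute_top_common_paths rows project_type_filter top_k exclude_empty prefix_tokens)

-- ===== LEMMAS AND PROOFS =====

-- the two filter predicates of the shared semantics (proof-side)
def pvKeepEmpty (ex : Bool) (s : String) : Bool := !(ex && (s == "START,END"))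

def pvKeepPrefix (pt? : Option (List String)) (s : String) : Bool :=
  match pt? with
  | none => true
  | some pt =>
    if pt.isEmpty then true
    else (if s == "" then [] else (PySem.Str.split? s ",").getD []).take pt.length == pt

-- B's loop computed in closed form
theorem altFold (ptf : Option String) (ex : Bool) (pt? : Option (List String))
    (rows : List (String × String)) (d : PySem.Dict String Int) (ta ee ep tb : Int) :
    rows.foldl (pvStep ptf ex pt?) (d, ta, ee, ep, tb)
    = (((((rows.filter (pvMatch ptf)).map (fun r => r.2)).filter
          (fun s => pvKeepEmpty ex s && pvKeepPrefix pt? s)).foldl (fun d x => d.modify x 0 (· + 1)) d),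
        ta + (((((rows.filter (pvMatch ptf)).map (fun r => r.2)).filter
          (fun s => pvKeepEmpty ex s && pvKeepPrefix pt? s)).length : Int)),
        ee + (((((rows.filter (pvMatch ptf)).map (fun r => r.2)).filter
          (fun s => !pvKeepEmpty ex s)).length : Int)),
        ep + (((((rows.filter (pvMatch ptf)).map (fun r => r.2)).filter
          (fun s => pvKeepEmpty ex s && !pvKeepPrefix pt? s)).length : Int)),
        tb + ((((rows.filter (pvMatch ptf)).map (fun r => r.2)).length : Int))) := by
  induction rows generalizing d ta ee ep tb with
  | nil => simp
  | cons r rest ih =>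
    rw [List.foldl_cons]
    by_cases hm : pvMatch ptf r = true
    · by_cases hx : (ex && (r.2 == "START,END")) = true
      · have he : pvKeepEmpty ex r.2 = false := by simp [pvKeepEmpty, hx]
        have hstep : pvStep ptf ex pt? (d, ta, ee, ep, tb) r = (d, ta, ee + 1, ep, tb + 1) := by
          simp [pvStep, hm, hx]
        rw [hstep, ih]
        simp only [List.filter_cons, List.map_cons, hm, if_true, he, Bool.false_and,
          Bool.not_false, Bool.false_eq_true, if_false, if_true, List.length_cons, Prod.mk.injEq]
        and_intros <;> first | rfl | trivial | (push_cast; omega)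
      · have hx' : (ex && (r.2 == "START,END")) = false := by
          revert hx; cases ex && (r.2 == "START,END") <;> simp
        have he : pvKeepEmpty ex r.2 = true := by simp [pvKeepEmpty, hx']
        by_cases hp : pvKeepPrefix pt? r.2 = true
        · have hstep : pvStep ptf ex pt? (d, ta, ee, ep, tb) r
              = (d.modify r.2 0 (· + 1), ta + 1, ee, ep, tb + 1) := by
            cases pt? with
            | none => simp [pvStep, hm, hx']
            | some pt =>
              by_cases hpe : pt.isEmpty = true
              · simp [pvStep, hm, hx', hpe]
              · have hpe' : pt.isEmpty = false := by revert hpe; cases pt.isEmpty <;> simp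
                have hq : ((if r.2 == "" then [] else (PySem.Str.split? r.2 ",").getD []).take pt.length == pt) = true := by
                  have := hp
                  simp only [pvKeepPrefix, hpe', Bool.false_eq_true, if_false] at this
                  exact this
                have hq2 : (if r.2 = "" then ([] : List String) else (PySem.Str.split? r.2 ",").getD []).take pt.length = pt := by
                  simpa using hq
                simp [pvStep, hm, hx', hpe', hq2]
          rw [hstep, ih]
          simp only [List.filter_cons, List.map_cons, hm, if_true, he, hp,
            Bool.and_self, Bool.not_true, Bool.and_false, Bool.false_eq_true, if_false, if_true,
            List.length_cons, List.foldl_cons, Prod.mk.injEq]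
          and_intros <;> first | rfl | trivial | (push_cast; omega)
        · have hp' : pvKeepPrefix pt? r.2 = false := by
            revert hp; cases pvKeepPrefix pt? r.2 <;> simp
          have hpt : ∃ pt : List String, pt? = some pt ∧ pt.isEmpty = false := by
            cases pt? with
            | none => simp [pvKeepPrefix] at hp'
            | some pt =>
              refine ⟨pt, rfl, ?_⟩
              by_cases hpe : pt.isEmpty = true
              · simp [pvKeepPrefix, hpe] at hp'
              · revert hpe; cases pt.isEmpty <;> simp
          obtain ⟨pt, rfl, hpe'⟩ := hpt
          have hq : ((if r.2 == "" then [] else (PySem.Str.split? r.2 ",").getD []).take pt.length == pt) = false := by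
            have := hp'
            simp only [pvKeepPrefix, hpe', Bool.false_eq_true, if_false] at this
            exact this
          have hq2 : ¬ ((if r.2 = "" then ([] : List String) else (PySem.Str.split? r.2 ",").getD []).take pt.length = pt) := by
            simpa using hq
          have hstep : pvStep ptf ex (some pt) (d, ta, ee, ep, tb) r = (d, ta, ee, ep + 1, tb + 1) := by
            simp [pvStep, hm, hx', hpe', hq2]
          rw [hstep, ih]
          simp only [List.filter_cons, List.map_cons, hm, if_true, he, hp',
            Bool.and_false, Bool.not_false, Bool.and_true, Bool.false_eq_true, if_false, if_true,
            List.length_cons, Prod.mk.injEq]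
          and_intros <;> first | rfl | trivial | (push_cast; omega)
    · have hm' : pvMatch ptf r = false := by revert hm; cases pvMatch ptf r <;> simp
      have hstep : pvStep ptf ex pt? (d, ta, ee, ep, tb) r = (d, ta, ee, ep, tb) := by
        simp [pvStep, hm']
      rw [hstep, ih]
      simp [hm']

-- the redundant length guard in A's prefix test
theorem guard_redundant (pt : List String) (tokens : List String) :
    (decide (pt.length ≤ tokens.length) && (tokens.take pt.length == pt)) = (tokens.take pt.length == pt) := by
  by_cases h : (tokens.take pt.length == pt) = true
  · have hlen : pt.length ≤ tokens.length := by
      have he : tokens.take pt.length = pt := by simpa using h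
      have := congrArg List.length he
      simp [List.length_take] at this
      omega
    simp [h, hlen]
  · simp only [Bool.not_eq_true] at h
    simp [h]

theorem len_sub_filter (l : List String) (p : String → Bool) :
    (l.length : Int) - ((l.filter p).length : Int) = ((l.filter (fun s => !p s)).length : Int) := by
  have h := List.length_eq_length_filter_add p (l := l)
  omega

-- ===== VERDICT (by name: the statement is the Claim_ definition above) =====
theorem compute_top_common_paths_spec : Claim_equal_compute_top_common_paths := by
  intro rows ptf top_k ex pt? hdom
  clear hdom
  unfold Spec_compute_top_common_paths compute_top_common_paths compute_top_common_paths_alt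
  rw [altFold]
  have hfs : (match ptf with
      | none => rows.map (fun r => r.2)
      | some f => (rows.filter (fun r => r.1 == f)).map (fun r => r.2))
      = (rows.filter (pvMatch ptf)).map (fun r => r.2) := by
    cases ptf with
    | none =>
      rw [show (pvMatch (none : Option String)) = (fun _ : String × String => true) from rfl]
      simp
    | some f => rfl
  have hL2 : (if ex then
        ((rows.filter (pvMatch ptf)).map (fun r => r.2)).filter (fun s => !(s == "START,END"))
      else (rows.filter (pvMatch ptf)).map (fun r => r.2))
      = ((rows.filter (pvMatch ptf)).map (fun r => r.2)).filter (pvKeepEmpty ex) := by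
    cases ex with
    | false =>
      rw [show pvKeepEmpty false = (fun _ : String => true) from rfl]
      simp
    | true =>
      rw [show pvKeepEmpty true = (fun s => !(s == "START,END")) from rfl]
      simp
  simp only [hfs, hL2]
  have hB := len_sub_filter ((rows.filter (pvMatch ptf)).map (fun r => r.2)) (pvKeepEmpty ex)
  cases pt? with
  | none =>
    have hpp1 : (fun s => pvKeepEmpty ex s && pvKeepPrefix none s) = pvKeepEmpty ex := by
      funext s; simp [pvKeepPrefix]
    have hpn1 : (fun s => pvKeepEmpty ex s && !pvKeepPrefix none s) = (fun _ : String => false) := by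
      funext s; simp [pvKeepPrefix]
    simp only [hpp1, hpn1, List.filter_false, List.length_nil, PySem.Dict.counter_eq_foldl,
      Prod.mk.injEq]
    and_intros <;> first | rfl | trivial | (simp only [List.length_map] at hB ⊢; push_cast at hB ⊢; omega)
  | some pt =>
    by_cases hpe : pt.isEmpty = true
    · have hpp1 : (fun s => pvKeepEmpty ex s && pvKeepPrefix (some pt) s) = pvKeepEmpty ex := by
        funext s; simp [pvKeepPrefix, hpe]
      have hpn1 : (fun s => pvKeepEmpty ex s && !pvKeepPrefix (some pt) s) = (fun _ : String => false) := by
        funext s; simp [pvKeepPrefix, hpe]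
      simp only [hpe, if_true, hpp1, hpn1, List.filter_false, List.length_nil,
        PySem.Dict.counter_eq_foldl, Prod.mk.injEq]
      and_intros <;> first | rfl | trivial | (simp only [List.length_map] at hB ⊢; push_cast at hB ⊢; omega)
    · have hpe' : pt.isEmpty = false := by revert hpe; cases pt.isEmpty <;> simp
      simp only [hpe', Bool.false_eq_true, if_false]
      rw [PySem.List.foldl_append_if
        (p := fun s => decide (pt.length ≤ (if s == "" then [] else (PySem.Str.split? s ",").getD []).length) &&
          ((if s == "" then [] else (PySem.Str.split? s ",").getD []).take pt.length == pt))
        (f := fun s => s)]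
      have hL3 :
          (((rows.filter (pvMatch ptf)).map (fun r => r.2)).filter (pvKeepEmpty ex)).filter
            (fun s => decide (pt.length ≤ (if s == "" then [] else (PySem.Str.split? s ",").getD []).length) &&
              ((if s == "" then [] else (PySem.Str.split? s ",").getD []).take pt.length == pt))
          = ((rows.filter (pvMatch ptf)).map (fun r => r.2)).filter
              (fun s => pvKeepEmpty ex s && pvKeepPrefix (some pt) s) := by
        rw [List.filter_filter]
        apply List.filter_congr
        intro s _
        rw [guard_redundant]
        simp [pvKeepPrefix, hpe']
        rw [Bool.and_comm]
      simp only [List.map_id', List.nil_append, hL3, PySem.Dict.counter_eq_foldl, Prod.mk.injEq]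
      have hpp : ((rows.filter (pvMatch ptf)).map (fun r => r.2)).filter
              (fun s => pvKeepEmpty ex s && pvKeepPrefix (some pt) s)
          = (((rows.filter (pvMatch ptf)).map (fun r => r.2)).filter (pvKeepEmpty ex)).filter
              (fun s => pvKeepPrefix (some pt) s) := by
        rw [List.filter_filter]
        exact List.filter_congr (fun s _ => Bool.and_comm _ _)
      have hnp : ((rows.filter (pvMatch ptf)).map (fun r => r.2)).filter
              (fun s => pvKeepEmpty ex s && !pvKeepPrefix (some pt) s)
          = (((rows.filter (pvMatch ptf)).map (fun r => r.2)).filter (pvKeepEmpty ex)).filter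
              (fun s => !pvKeepPrefix (some pt) s) := by
        rw [List.filter_filter]
        exact List.filter_congr (fun s _ => Bool.and_comm _ _)
      have hB2 := len_sub_filter (((rows.filter (pvMatch ptf)).map (fun r => r.2)).filter (pvKeepEmpty ex))
        (fun s => pvKeepPrefix (some pt) s)
      and_intros
      · trivial
      · omega
      · simp only [List.length_map] at hB ⊢; omega
      · rw [hpp, hnp]; omega
      · simp only [List.length_map]; omega
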